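-- pv_equiv track=rewrite | github.com/sskibin22/AI_Final_Project | NaiveBayes_Digit_Rec(Convolution).py | get_data_tables
-- ===== SOURCE A (Python) =====
-- def get_data_tables(f_list, labels_list, feat_total, d_total):
--     data_table_0 = []
--     data_table_1 = []
--     data_table_2 = []
--     data_table_3 = []
--     data_table_4 = []
--     data_table_5 = []
--     data_table_6 = []
--     data_table_7 = []
--     data_table_8 = []
--     data_table_9 = []
--     for y in range(feat_total):
--         data_rows_0 = []
--         data_rows_1 = []
--         data_rows_2 = []
--         data_rows_3 = []
--         data_rows_4 = []
--         data_rows_5 = []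
--         data_rows_6 = []
--         data_rows_7 = []
--         data_rows_8 = []
--         data_rows_9 = []
--         for x in range(d_total):
--             if labels_list[x] == '0':
--                 data_rows_0.append(f_list[x][y])
--             elif labels_list[x] == '1':
--                 data_rows_1.append(f_list[x][y])
--             elif labels_list[x] == '2':
--                 data_rows_2.append(f_list[x][y])
--             elif labels_list[x] == '3':
--                 data_rows_3.append(f_list[x][y])
--             elif labels_list[x] == '4':
--                 data_rows_4.append(f_list[x][y])
--             elif labels_list[x] == '5':
--                 data_rows_5.append(f_list[x][y])
--             elif labels_list[x] == '6':
--                 data_rows_6.append(f_list[x][y])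
--             elif labels_list[x] == '7':
--                 data_rows_7.append(f_list[x][y])
--             elif labels_list[x] == '8':
--                 data_rows_8.append(f_list[x][y])
--             elif labels_list[x] == '9':
--                 data_rows_9.append(f_list[x][y])
--             else:
--                 continue
--
--         data_table_0.append(data_rows_0)
--         data_table_1.append(data_rows_1)
--         data_table_2.append(data_rows_2)
--         data_table_3.append(data_rows_3)
--         data_table_4.append(data_rows_4)
--         data_table_5.append(data_rows_5)
--         data_table_6.append(data_rows_6)
--         data_table_7.append(data_rows_7)
--         data_table_8.append(data_rows_8)
--         data_table_9.append(data_rows_9)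
--
--     return data_table_0, data_table_1, data_table_2, data_table_3, data_table_4, data_table_5, data_table_6, data_table_7, data_table_8, data_table_9
-- ===== SOURCE B (Python) =====
-- def get_data_tables(f_list, labels_list, feat_total, d_total):
--     if feat_total <= 0:
--         # no feature columns requested: ten empty tables, nothing to group
--         return [], [], [], [], [], [], [], [], [], []
--     digits = "0123456789"
--     # Phase 1: group sample indices by label once (non-digit labels are dropped).
--     idx = {d: [x for x in range(d_total) if labels_list[x] == d] for d in digits}
--     # Phase 2: gather each digit's table column-by-column from the precomputed index lists.
--     return tuple(
--         [[f_list[x][y] for x in idx[d]] for y in range(feat_total)]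
--         for d in digits
--     )
-- ===== Notes on version B (the rewrite author's own statement) =====
-- stated objective: faster
-- what changed: Instead of re-running a 10-way if/elif label comparison for every (feature, sample) pair inside nested loops, B groups sample indices by digit label once (10*d_total comparisons instead of feat_total*d_total) after an early return of ten empty tables when feat_total <= 0, and then builds each table by gathering f_list[x][y] over the precomputed index lists.
import Mathlib
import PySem

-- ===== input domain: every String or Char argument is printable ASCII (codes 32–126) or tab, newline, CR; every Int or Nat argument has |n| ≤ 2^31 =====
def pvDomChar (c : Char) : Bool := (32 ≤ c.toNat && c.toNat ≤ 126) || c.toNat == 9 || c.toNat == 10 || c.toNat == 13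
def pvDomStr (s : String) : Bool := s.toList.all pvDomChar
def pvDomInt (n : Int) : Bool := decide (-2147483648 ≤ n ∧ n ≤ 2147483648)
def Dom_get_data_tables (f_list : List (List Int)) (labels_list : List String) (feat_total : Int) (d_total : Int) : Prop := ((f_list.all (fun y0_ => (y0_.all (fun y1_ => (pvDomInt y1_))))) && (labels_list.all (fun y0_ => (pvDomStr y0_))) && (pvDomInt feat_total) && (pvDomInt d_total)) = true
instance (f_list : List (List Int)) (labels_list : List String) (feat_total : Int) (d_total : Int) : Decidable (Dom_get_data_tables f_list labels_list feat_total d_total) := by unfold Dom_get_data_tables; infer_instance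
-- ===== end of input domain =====

-- B groups sample indices by digit label once (after an early return of ten empty tables when
-- feat_total ≤ 0), then gathers each table from those index lists, instead of A's 10-way
-- if/elif comparison for every (feature, sample) pair (faster in a timing run).

-- f_list[x][y], total via defaults; Pre_ guarantees both indexings are in range wherever used
def pvVal (f_list : List (List Int)) (x y : Int) : Int :=
  PySem.List.pyGetD (PySem.List.pyGetD f_list x []) y 0

-- ===== PORT A =====
structure PvRows where
  c0 : List Int
  c1 : List Int
  c2 : List Int
  c3 : List Int
  c4 : List Int
  c5 : List Int
  c6 : List Int
  c7 : List Int
  c8 : List Int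
  c9 : List Int
deriving Repr, DecidableEq

structure PvTabs where
  c0 : List (List Int)
  c1 : List (List Int)
  c2 : List (List Int)
  c3 : List (List Int)
  c4 : List (List Int)
  c5 : List (List Int)
  c6 : List (List Int)
  c7 : List (List Int)
  c8 : List (List Int)
  c9 : List (List Int)
deriving Repr, DecidableEq

-- the body of A's inner loop: the if/elif chain on labels_list[x]
def pvAStep (f_list : List (List Int)) (labels_list : List String) (y : Int)
    (r : PvRows) (x : Int) : PvRows :=
  if PySem.List.pyGetD labels_list x "" == "0" then { r with c0 := r.c0 ++ [pvVal f_list x y] }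
  else if PySem.List.pyGetD labels_list x "" == "1" then { r with c1 := r.c1 ++ [pvVal f_list x y] }
  else if PySem.List.pyGetD labels_list x "" == "2" then { r with c2 := r.c2 ++ [pvVal f_list x y] }
  else if PySem.List.pyGetD labels_list x "" == "3" then { r with c3 := r.c3 ++ [pvVal f_list x y] }
  else if PySem.List.pyGetD labels_list x "" == "4" then { r with c4 := r.c4 ++ [pvVal f_list x y] }
  else if PySem.List.pyGetD labels_list x "" == "5" then { r with c5 := r.c5 ++ [pvVal f_list x y] }
  else if PySem.List.pyGetD labels_list x "" == "6" then { r with c6 := r.c6 ++ [pvVal f_list x y] }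
  else if PySem.List.pyGetD labels_list x "" == "7" then { r with c7 := r.c7 ++ [pvVal f_list x y] }
  else if PySem.List.pyGetD labels_list x "" == "8" then { r with c8 := r.c8 ++ [pvVal f_list x y] }
  else if PySem.List.pyGetD labels_list x "" == "9" then { r with c9 := r.c9 ++ [pvVal f_list x y] }
  else r

-- A's inner loop: for x in range(d_total)
def pvAInner (f_list : List (List Int)) (labels_list : List String) (d_total y : Int) : PvRows :=
  (PySem.List.pyRange 0 d_total 1).foldl (pvAStep f_list labels_list y)
    ⟨[], [], [], [], [], [], [], [], [], []⟩

-- the body of A's outer loop: append this feature's ten rows to the ten tables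
def pvAOuterStep (f_list : List (List Int)) (labels_list : List String) (d_total : Int)
    (t : PvTabs) (y : Int) : PvTabs :=
  let r := pvAInner f_list labels_list d_total y
  ⟨t.c0 ++ [r.c0], t.c1 ++ [r.c1], t.c2 ++ [r.c2], t.c3 ++ [r.c3], t.c4 ++ [r.c4],
   t.c5 ++ [r.c5], t.c6 ++ [r.c6], t.c7 ++ [r.c7], t.c8 ++ [r.c8], t.c9 ++ [r.c9]⟩

def get_data_tables (f_list : List (List Int)) (labels_list : List String) (feat_total : Int) (d_total : Int) : List (List Int) × List (List Int) × List (List Int) × List (List Int) × List (List Int) × List (List Int) × List (List Int) × List (List Int) × List (List Int) × List (List Int) :=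
  let t := (PySem.List.pyRange 0 feat_total 1).foldl (pvAOuterStep f_list labels_list d_total)
    ⟨[], [], [], [], [], [], [], [], [], []⟩
  (t.c0, t.c1, t.c2, t.c3, t.c4, t.c5, t.c6, t.c7, t.c8, t.c9)

-- ===== PORT B =====
-- idx[d] = [x for x in range(d_total) if labels_list[x] == d]
def pvIdx (labels_list : List String) (d_total : Int) (d : String) : List Int :=
  (PySem.List.pyRange 0 d_total 1).filter (fun x => PySem.List.pyGetD labels_list x "" == d)

-- [[f_list[x][y] for x in idx[d]] for y in range(feat_total)]
def pvTable (f_list : List (List Int)) (labels_list : List String) (feat_total d_total : Int)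
    (d : String) : List (List Int) :=
  (PySem.List.pyRange 0 feat_total 1).map
    (fun y => (pvIdx labels_list d_total d).map (fun x => pvVal f_list x y))

def get_data_tables_alt (f_list : List (List Int)) (labels_list : List String) (feat_total : Int) (d_total : Int) : List (List Int) × List (List Int) × List (List Int) × List (List Int) × List (List Int) × List (List Int) × List (List Int) × List (List Int) × List (List Int) × List (List Int) :=
  if feat_total ≤ 0 then ([], [], [], [], [], [], [], [], [], [])
  else
    (pvTable f_list labels_list feat_total d_total "0",
     pvTable f_list labels_list feat_total d_total "1",
     pvTable f_list labels_list feat_total d_total "2",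
     pvTable f_list labels_list feat_total d_total "3",
     pvTable f_list labels_list feat_total d_total "4",
     pvTable f_list labels_list feat_total d_total "5",
     pvTable f_list labels_list feat_total d_total "6",
     pvTable f_list labels_list feat_total d_total "7",
     pvTable f_list labels_list feat_total d_total "8",
     pvTable f_list labels_list feat_total d_total "9")

-- ===== PRECONDITION & SPEC =====
-- Pre_ excludes exactly the inputs where Python A raises IndexError: feat_total > 0 together
-- with a positive d_total exceeding len(labels_list), or a digit-labelled sample among the
-- first d_total whose feature row is missing or shorter than feat_total.
def Pre_get_data_tables (f_list : List (List Int)) (labels_list : List String) (feat_total : Int) (d_total : Int) : Prop :=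
  feat_total ≤ 0 ∨ d_total ≤ 0 ∨
    (d_total ≤ (labels_list.length : Int) ∧
      ∀ x ∈ List.range d_total.toNat,
        labels_list.getD x "" ∈ ["0", "1", "2", "3", "4", "5", "6", "7", "8", "9"] →
          (x < f_list.length ∧ feat_total ≤ ((f_list.getD x []).length : Int)))
instance (f_list : List (List Int)) (labels_list : List String) (feat_total : Int) (d_total : Int) : Decidable (Pre_get_data_tables f_list labels_list feat_total d_total) := by unfold Pre_get_data_tables; infer_instance

def pvWitness_get_data_tables : List (List Int) × List String × Int × Int :=
  ([[1], [2], [3]], ["0", "7", "x"], 1, 3)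

def Spec_get_data_tables (f_list : List (List Int)) (labels_list : List String) (feat_total : Int) (d_total : Int) (out : List (List Int) × List (List Int) × List (List Int) × List (List Int) × List (List Int) × List (List Int) × List (List Int) × List (List Int) × List (List Int) × List (List Int)) : Prop := out = get_data_tables_alt f_list labels_list feat_total d_total
instance (f_list : List (List Int)) (labels_list : List String) (feat_total : Int) (d_total : Int) (out : List (List Int) × List (List Int) × List (List Int) × List (List Int) × List (List Int) × List (List Int) × List (List Int) × List (List Int) × List (List Int) × List (List Int)) : Decidable (Spec_get_data_tables f_list labels_list feat_total d_total out) := by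
  unfold Spec_get_data_tables
  letI i2 : DecidableEq (List (List Int) × List (List Int)) := instDecidableEqProd
  letI i3 : DecidableEq (List (List Int) × List (List Int) × List (List Int)) := instDecidableEqProd
  letI i4 : DecidableEq (List (List Int) × List (List Int) × List (List Int) × List (List Int)) := instDecidableEqProd
  letI i5 : DecidableEq (List (List Int) × List (List Int) × List (List Int) × List (List Int) × List (List Int)) := instDecidableEqProd
  letI i6 : DecidableEq (List (List Int) × List (List Int) × List (List Int) × List (List Int) × List (List Int) × List (List Int)) := instDecidableEqProd
  letI i7 : DecidableEq (List (List Int) × List (List Int) × List (List Int) × List (List Int) × List (List Int) × List (List Int) × List (List Int)) := instDecidableEqProd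
  letI i8 : DecidableEq (List (List Int) × List (List Int) × List (List Int) × List (List Int) × List (List Int) × List (List Int) × List (List Int) × List (List Int)) := instDecidableEqProd
  letI i9 : DecidableEq (List (List Int) × List (List Int) × List (List Int) × List (List Int) × List (List Int) × List (List Int) × List (List Int) × List (List Int) × List (List Int)) := instDecidableEqProd
  letI i10 : DecidableEq (List (List Int) × List (List Int) × List (List Int) × List (List Int) × List (List Int) × List (List Int) × List (List Int) × List (List Int) × List (List Int) × List (List Int)) := instDecidableEqProd
  exact i10 out (get_data_tables_alt f_list labels_list feat_total d_total)

-- ===== CLAIM (what is proved, stated in full; the proofs are below) =====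
def Claim_equal_get_data_tables : Prop := ∀ (f_list : List (List Int)) (labels_list : List String) (feat_total : Int) (d_total : Int), Dom_get_data_tables f_list labels_list feat_total d_total → Pre_get_data_tables f_list labels_list feat_total d_total → Spec_get_data_tables f_list labels_list feat_total d_total (get_data_tables f_list labels_list feat_total d_total)

-- ===== LEMMAS AND PROOFS =====

-- A's inner loop leaves, in each field, the initial list followed by the values of the
-- samples with that label, in loop order — i.e. exactly B's gather over the filtered indices.
set_option maxHeartbeats 1000000 in
theorem pvAInner_foldl (f_list : List (List Int)) (labels_list : List String) (y : Int)
    (xs : List Int) (r : PvRows) :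
    xs.foldl (pvAStep f_list labels_list y) r =
      ⟨r.c0 ++ (xs.filter (fun x => PySem.List.pyGetD labels_list x "" == "0")).map (fun x => pvVal f_list x y),
       r.c1 ++ (xs.filter (fun x => PySem.List.pyGetD labels_list x "" == "1")).map (fun x => pvVal f_list x y),
       r.c2 ++ (xs.filter (fun x => PySem.List.pyGetD labels_list x "" == "2")).map (fun x => pvVal f_list x y),
       r.c3 ++ (xs.filter (fun x => PySem.List.pyGetD labels_list x "" == "3")).map (fun x => pvVal f_list x y),
       r.c4 ++ (xs.filter (fun x => PySem.List.pyGetD labels_list x "" == "4")).map (fun x => pvVal f_list x y),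
       r.c5 ++ (xs.filter (fun x => PySem.List.pyGetD labels_list x "" == "5")).map (fun x => pvVal f_list x y),
       r.c6 ++ (xs.filter (fun x => PySem.List.pyGetD labels_list x "" == "6")).map (fun x => pvVal f_list x y),
       r.c7 ++ (xs.filter (fun x => PySem.List.pyGetD labels_list x "" == "7")).map (fun x => pvVal f_list x y),
       r.c8 ++ (xs.filter (fun x => PySem.List.pyGetD labels_list x "" == "8")).map (fun x => pvVal f_list x y),
       r.c9 ++ (xs.filter (fun x => PySem.List.pyGetD labels_list x "" == "9")).map (fun x => pvVal f_list x y)⟩ := by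
  induction xs generalizing r with
  | nil => cases r; simp
  | cons x xs ih =>
    simp only [List.foldl_cons, ih, List.filter_cons]
    by_cases h0 : PySem.List.pyGetD labels_list x "" = "0"
    · simp [pvAStep, h0, List.append_assoc]
    by_cases h1 : PySem.List.pyGetD labels_list x "" = "1"
    · simp [pvAStep, h1, List.append_assoc]
    by_cases h2 : PySem.List.pyGetD labels_list x "" = "2"
    · simp [pvAStep, h2, List.append_assoc]
    by_cases h3 : PySem.List.pyGetD labels_list x "" = "3"
    · simp [pvAStep, h3, List.append_assoc]
    by_cases h4 : PySem.List.pyGetD labels_list x "" = "4"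
    · simp [pvAStep, h4, List.append_assoc]
    by_cases h5 : PySem.List.pyGetD labels_list x "" = "5"
    · simp [pvAStep, h5, List.append_assoc]
    by_cases h6 : PySem.List.pyGetD labels_list x "" = "6"
    · simp [pvAStep, h6, List.append_assoc]
    by_cases h7 : PySem.List.pyGetD labels_list x "" = "7"
    · simp [pvAStep, h7, List.append_assoc]
    by_cases h8 : PySem.List.pyGetD labels_list x "" = "8"
    · simp [pvAStep, h8, List.append_assoc]
    by_cases h9 : PySem.List.pyGetD labels_list x "" = "9"
    · simp [pvAStep, h9, List.append_assoc]
    · simp [pvAStep, h0, h1, h2, h3, h4, h5, h6, h7, h8, h9]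

-- A's outer loop appends one row per feature y to each table
set_option maxHeartbeats 1000000 in
theorem pvAOuter_foldl (f_list : List (List Int)) (labels_list : List String) (d_total : Int)
    (ys : List Int) (t : PvTabs) :
    ys.foldl (pvAOuterStep f_list labels_list d_total) t =
      ⟨t.c0 ++ ys.map (fun y => (pvAInner f_list labels_list d_total y).c0),
       t.c1 ++ ys.map (fun y => (pvAInner f_list labels_list d_total y).c1),
       t.c2 ++ ys.map (fun y => (pvAInner f_list labels_list d_total y).c2),
       t.c3 ++ ys.map (fun y => (pvAInner f_list labels_list d_total y).c3),
       t.c4 ++ ys.map (fun y => (pvAInner f_list labels_list d_total y).c4),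
       t.c5 ++ ys.map (fun y => (pvAInner f_list labels_list d_total y).c5),
       t.c6 ++ ys.map (fun y => (pvAInner f_list labels_list d_total y).c6),
       t.c7 ++ ys.map (fun y => (pvAInner f_list labels_list d_total y).c7),
       t.c8 ++ ys.map (fun y => (pvAInner f_list labels_list d_total y).c8),
       t.c9 ++ ys.map (fun y => (pvAInner f_list labels_list d_total y).c9)⟩ := by
  induction ys generalizing t with
  | nil => cases t; simp
  | cons y ys ih =>
    rw [List.foldl_cons, ih]
    simp [pvAOuterStep, List.append_assoc]

-- when feat_total ≤ 0 the outer range is empty, so A already returns ten empty tables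
theorem pyRange_nonpos (n : Int) (h : n ≤ 0) : PySem.List.pyRange 0 n 1 = [] := by
  simp [PySem.List.pyRange]; omega

-- ===== VERDICT (by name: the statement is the Claim_ definition above) =====
theorem get_data_tables_spec : Claim_equal_get_data_tables := by
  intro f_list labels_list feat_total d_total _ _
  unfold Spec_get_data_tables get_data_tables get_data_tables_alt
  by_cases h : feat_total ≤ 0
  · simp [h, pyRange_nonpos feat_total h]
  · simp only [if_neg h]
    simp only [pvAOuter_foldl, pvTable, pvIdx]
    simp only [pvAInner, pvAInner_foldl, List.nil_append]
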